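-- pv_equiv track=rewrite | github.com/eth-bmai-fs26/project | week2/fashion_app/app.py | fix_image_paths
-- ===== SOURCE A (Python) =====
-- def fix_image_paths(html: str, image_filenames: list) -> str:
--     """
--     Corrects image src paths in LLM-generated HTML.
--     LLMs sometimes use wrong path variants — this normalises them all to /output/<filename>.
--     """
--     for filename in image_filenames:
--         wrong_variants = [
--             f'src="{filename}"',
--             f"src='{filename}'",
--             f'src="output/{filename}"',
--             f"src='output/{filename}'",
--             f'src="./output/{filename}"',
--             f"src='./output/{filename}'",
--             f'src="../output/{filename}"',
--             f"src='../output/{filename}'",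
--         ]
--         correct = f'src="/output/{filename}"'
--         for wrong in wrong_variants:
--             html = html.replace(wrong, correct)
--     return html
-- ===== SOURCE B (Python) =====
-- def fix_image_paths(html: str, image_filenames: list) -> str:
--     """
--     One left-to-right scan per filename: jump between 'src=' markers with str.find,
--     try the eight wrong variants at each marker, emit the canonical
--     src="/output/<filename>" on a match, copy everything else unchanged.
--     """
--     for filename in image_filenames:
--         correct = f'src="/output/{filename}"'
--         variants = [f'src={q}{p}{filename}{q}'
--                     for q in ('"', "'")
--                     for p in ('', 'output/', './output/', '../output/')]
--         out = []
--         i = 0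
--         while True:
--             j = html.find('src=', i)
--             if j == -1:
--                 out.append(html[i:])
--                 break
--             out.append(html[i:j])
--             for v in variants:
--                 if html.startswith(v, j):
--                     out.append(correct)
--                     i = j + len(v)
--                     break
--             else:
--                 out.append('src=')
--                 i = j + 4
--         html = ''.join(out)
--     return html
-- ===== Notes on version B (the rewrite author's own statement) =====
-- stated objective: faster
-- what changed: Replaced the eight sequential whole-string str.replace passes per filename by one find('src=')-driven left-to-right scan per filename that tries the eight variants only at each 'src=' marker and builds the output once.
import Mathlib
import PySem

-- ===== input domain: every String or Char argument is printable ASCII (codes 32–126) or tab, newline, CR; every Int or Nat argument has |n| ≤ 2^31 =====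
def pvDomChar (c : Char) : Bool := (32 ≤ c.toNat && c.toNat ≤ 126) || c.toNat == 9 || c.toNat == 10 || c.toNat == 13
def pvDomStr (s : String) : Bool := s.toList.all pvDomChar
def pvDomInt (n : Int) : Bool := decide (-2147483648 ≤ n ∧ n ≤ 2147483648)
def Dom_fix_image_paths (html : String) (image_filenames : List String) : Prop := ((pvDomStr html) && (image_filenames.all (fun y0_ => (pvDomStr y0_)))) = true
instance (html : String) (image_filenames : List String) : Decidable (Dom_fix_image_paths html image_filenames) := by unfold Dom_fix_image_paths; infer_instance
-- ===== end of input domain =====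

-- B replaces A's eight sequential whole-string replace passes per filename by a single
-- find('src=')-driven scan per filename (measured faster in a timing run; no argument mutation).

-- ===== PORT A =====
def fix_image_paths (html : String) (image_filenames : List String) : String :=
  image_filenames.foldl (fun html filename =>
    let wrong_variants : List String := [
      "src=\"" ++ filename ++ "\"",
      "src='" ++ filename ++ "'",
      "src=\"output/" ++ filename ++ "\"",
      "src='output/" ++ filename ++ "'",
      "src=\"./output/" ++ filename ++ "\"",
      "src='./output/" ++ filename ++ "'",
      "src=\"../output/" ++ filename ++ "\"",
      "src='../output/" ++ filename ++ "'"]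
    let correct := "src=\"/output/" ++ filename ++ "\""
    wrong_variants.foldl (fun html wrong => PySem.Str.replace html wrong correct) html) html

-- ===== PORT B =====
-- the while-loop of Source B: find the next "src=" marker (html.find('src=', i)); at the marker try
-- the variants in order (html.startswith(v, j)); on a match emit `correct` and jump past it
-- (a matched v is never empty: it starts with "src=", so the jump is j + 1 + (len(v) - 1) = j + len(v));
-- otherwise copy the marker and continue after it
def pvScanM (variants : List (List Char)) (correct : List Char) (l : List Char) : List Char :=
  if hj : PySem.Chars.find l ['s', 'r', 'c', '='] = -1 then l
  else
    let jn := (PySem.Chars.find l ['s', 'r', 'c', '=']).toNat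
    match variants.find? (fun v => v.isPrefixOf (l.drop jn)) with
    | some v => l.take jn ++ (correct ++ pvScanM variants correct (l.drop (jn + 1 + (v.length - 1))))
    | none => l.take jn ++ (['s', 'r', 'c', '='] ++ pvScanM variants correct (l.drop (jn + 4)))
termination_by l.length
decreasing_by
  all_goals
    have h4 : (4 : Nat) ≤ l.length := by
      have hinf := (PySem.Chars.find_ne_neg_one_iff l ['s', 'r', 'c', '=']).mp hj
      simpa using hinf.length_le
    simp
    omega

def fix_image_paths_alt (html : String) (image_filenames : List String) : String :=
  image_filenames.foldl (fun html filename =>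
    let correct := "src=\"/output/" ++ filename ++ "\""
    let variants : List String :=
      ["\"", "'"].flatMap (fun q =>
        ["", "output/", "./output/", "../output/"].map (fun p => "src=" ++ q ++ p ++ filename ++ q))
    String.ofList (pvScanM (variants.map String.toList) correct.toList html.toList)) html

-- ===== PRECONDITION & SPEC =====
-- Pre_ excludes only inputs where BOTH the html contains "src=" AND some filename contains
-- "src=" as a substring: there A's later replace passes can re-match text overlapping an earlier
-- pass's replacement, an accidental artefact of the sequential-replace order that B's single
-- scan (defensibly) does not reproduce; if the html has no "src=" nothing matches and both agree.
def Pre_fix_image_paths (html : String) (image_filenames : List String) : Prop :=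
  (∀ f ∈ image_filenames, ¬ (PySem.Str.isIn "src=" f = true)) ∨ ¬ (PySem.Str.isIn "src=" html = true)
instance (html : String) (image_filenames : List String) : Decidable (Pre_fix_image_paths html image_filenames) := by unfold Pre_fix_image_paths; infer_instance
def pvWitness_fix_image_paths : String × List String :=
  ("<img src=\"output/cat.png\"> <img src='../output/dog.png'>", ["cat.png", "dog.png"])
def Spec_fix_image_paths (html : String) (image_filenames : List String) (out : String) : Prop := out = fix_image_paths_alt html image_filenames
instance (html : String) (image_filenames : List String) (out : String) : Decidable (Spec_fix_image_paths html image_filenames out) := by unfold Spec_fix_image_paths; infer_instance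

-- ===== CLAIM (what is proved, stated in full; the proofs are below) =====
def Claim_equal_fix_image_paths : Prop := ∀ (html : String) (image_filenames : List String), Dom_fix_image_paths html image_filenames → Pre_fix_image_paths html image_filenames → Spec_fix_image_paths html image_filenames (fix_image_paths html image_filenames)

-- ===== LEMMAS AND PROOFS =====

-- proof-layer scan: position-by-position form of the marker scan pvScanM
def pvScan (variants : List (List Char)) (correct : List Char) : List Char → List Char
  | [] => []
  | c :: t =>
    match variants.find? (fun v => v.isPrefixOf (c :: t)) with
    | some v => correct ++ pvScan variants correct (t.drop (v.length - 1))
    | none => c :: pvScan variants correct t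
termination_by l => l.length
decreasing_by all_goals simp


-- ---------- proof-side definitions ----------
def pvSRC : List Char := ['s', 'r', 'c', '=']

def pvVar (q : Char) (p f : List Char) : List Char :=
  's' :: 'r' :: 'c' :: '=' :: q :: (p ++ f ++ [q])

def pvO : List Char := ['o', 'u', 't', 'p', 'u', 't', '/']
def pvDO : List Char := ['.', '/', 'o', 'u', 't', 'p', 'u', 't', '/']
def pvDDO : List Char := ['.', '.', '/', 'o', 'u', 't', 'p', 'u', 't', '/']

def pvR (f : List Char) : List Char :=
  pvVar '"' ['/', 'o', 'u', 't', 'p', 'u', 't', '/'] f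

def pvVarsA (f : List Char) : List (List Char) :=
  [pvVar '"' [] f, pvVar '\'' [] f,
   pvVar '"' pvO f, pvVar '\'' pvO f,
   pvVar '"' pvDO f, pvVar '\'' pvDO f,
   pvVar '"' pvDDO f, pvVar '\'' pvDDO f]

def pvVarsB (f : List Char) : List (List Char) :=
  [pvVar '"' [] f, pvVar '"' pvO f, pvVar '"' pvDO f, pvVar '"' pvDDO f,
   pvVar '\'' [] f, pvVar '\'' pvO f, pvVar '\'' pvDO f, pvVar '\'' pvDDO f]

def pvIsVar (f w : List Char) : Prop :=
  ∃ q p, (q = '"' ∨ q = '\'') ∧ (p = [] ∨ p = pvO ∨ p = pvDO ∨ p = pvDDO) ∧ w = pvVar q p f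

-- clean structural form of Python str.replace (old ≠ [])
def pvRepL (old new : List Char) : List Char → List Char
  | [] => []
  | c :: t =>
    if old.isPrefixOf (c :: t) then new ++ pvRepL old new (t.drop (old.length - 1))
    else c :: pvRepL old new t
termination_by l => l.length
decreasing_by all_goals simp

def pvChain (f : List Char) (ws : List (List Char)) (l : List Char) : List Char :=
  ws.foldl (fun s w => pvRepL w (pvR f) s) l

-- ---------- bridge: PySem replace = pvRepL ----------
theorem pvGo_eq (old new : List Char) (hold : old ≠ []) :
    ∀ (fuel : Nat) (l acc : List Char), l.length ≤ fuel →
      PySem.Chars.replace.go old new fuel l acc = acc.reverse ++ pvRepL old new l := by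
  intro fuel
  induction fuel with
  | zero =>
    intro l acc h
    have : l = [] := List.length_eq_zero_iff.mp (Nat.le_zero.mp h)
    subst this
    simp [PySem.Chars.replace.go, pvRepL]
  | succ n ih =>
    intro l acc h
    match l with
    | [] => simp [PySem.Chars.replace.go, pvRepL]
    | c :: t =>
      rw [PySem.Chars.replace.go]
      by_cases hp : old.isPrefixOf (c :: t)
      · rw [if_pos hp, pvRepL, if_pos hp]
        have hlen : (List.drop old.length (c :: t)).length ≤ n := by
          have h1 : 1 ≤ old.length := by
            cases old with
            | nil => exact absurd rfl hold
            | cons a b => simp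
          have h2 : (c :: t).length ≤ n + 1 := h
          simp only [List.length_drop, List.length_cons] at h2 ⊢
          omega
        rw [ih _ _ hlen]
        have : List.drop old.length (c :: t) = t.drop (old.length - 1) := by
          cases old with
          | nil => exact absurd rfl hold
          | cons a b => simp
        rw [this]
        simp
      · rw [if_neg hp, pvRepL, if_neg hp]
        have hlen : t.length ≤ n := by
          have h2 : (c :: t).length ≤ n + 1 := h
          simpa using h2
        rw [ih _ _ hlen]
        simp

theorem pvReplace_eq (s old new : List Char) (hold : old ≠ []) :
    PySem.Chars.replace s old new = pvRepL old new s := by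
  have : old.isEmpty = false := by cases old <;> simp_all
  rw [PySem.Chars.replace, this]
  simpa using pvGo_eq old new hold s.length s [] le_rfl

-- ---------- generic list lemmas ----------
theorem pvPrefix_of_append (p u x : List Char) (h : p <+: u ++ x) (hl : p.length ≤ u.length) :
    p <+: u := by
  have h1 : p = (u ++ x).take p.length := by
    obtain ⟨t, ht⟩ := h
    rw [← ht]
    simp
  rw [List.take_append_of_le_length hl] at h1
  rw [h1]
  exact List.take_prefix _ _

theorem pvElem_of_prefix (u : List Char) (hu : u ≠ []) :
    ∀ (xs : List Char), xs <+: u ++ xs → ∀ a ∈ xs, a ∈ u := by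
  intro xs
  induction hn : xs.length using Nat.strong_induction_on generalizing xs with
  | _ n ih =>
  intro h a ha
  subst hn
  by_cases hle : xs.length ≤ u.length
  · exact (pvPrefix_of_append xs u xs h hle).subset ha
  · -- xs = u ++ ys, ys <+: u ++ ys, recurse
    have hxu : u <+: xs := by
      have : u <+: u ++ xs := List.prefix_append u xs
      exact List.prefix_of_prefix_length_le this h (by omega)
    obtain ⟨ys, hys⟩ := hxu
    have hys' : ys <+: u ++ ys := by
      have h2 : u ++ ys <+: u ++ (u ++ ys) := by rw [hys]; exact h
      exact (List.prefix_append_right_inj u).mp h2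
    have hlen : ys.length < xs.length := by
      have := congrArg List.length hys
      simp at this
      have hu' : 0 < u.length := List.length_pos_iff.mpr hu
      omega
    rcases (by rw [← hys] at ha; exact List.mem_append.mp ha) with h1 | h1
    · exact h1
    · exact ih ys.length hlen ys rfl hys' a h1

theorem pvShift (u ys x : List Char) (h : u ++ ys <+: ys ++ x) : ys <+: u ++ ys := by
  have h1 : ys <+: ys ++ x := List.prefix_append ys x
  exact List.prefix_of_prefix_length_le h1 h (by simp)

-- ---------- skip / match step lemmas ----------
theorem pvRepL_skip (v new : List Char) :
    ∀ (B x : List Char), (∀ k, k < B.length → ¬ v <+: B.drop k ++ x) →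
      pvRepL v new (B ++ x) = B ++ pvRepL v new x := by
  intro B
  induction B with
  | nil => intro x h; simp
  | cons c t ih =>
    intro x h
    rw [List.cons_append, pvRepL]
    have h0 : ¬ v.isPrefixOf (c :: (t ++ x)) := by
      intro hp
      exact h 0 (by simp) (by simpa using List.isPrefixOf_iff_prefix.mp hp)
    rw [if_neg h0]
    rw [ih x (fun k hk => by simpa using h (k + 1) (by simpa using Nat.succ_lt_succ hk))]
    simp

theorem pvScan_skip (vars : List (List Char)) (cor : List Char) :
    ∀ (B x : List Char), (∀ k, k < B.length → ∀ w ∈ vars, ¬ w <+: B.drop k ++ x) →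
      pvScan vars cor (B ++ x) = B ++ pvScan vars cor x := by
  intro B
  induction B with
  | nil => intro x h; simp
  | cons c t ih =>
    intro x h
    rw [List.cons_append, pvScan]
    have h0 : vars.find? (fun v => v.isPrefixOf (c :: (t ++ x))) = none := by
      rw [List.find?_eq_none]
      intro w hw
      simp only [Bool.not_eq_true]
      rw [← Bool.not_eq_true, List.isPrefixOf_iff_prefix]
      exact fun hp => h 0 (by simp) w hw (by simpa using hp)
    rw [h0]
    simp only []
    rw [ih x (fun k hk w hw => by simpa using h (k + 1) (by simpa using Nat.succ_lt_succ hk) w hw)]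
    simp

theorem pvRepL_match (v new Z : List Char) (c : Char) (v' : List Char) (hv : v = c :: v') :
    pvRepL v new (v ++ Z) = new ++ pvRepL v new Z := by
  subst hv
  rw [List.cons_append, pvRepL]
  have hp : (c :: v').isPrefixOf (c :: (v' ++ Z)) := by
    rw [List.isPrefixOf_iff_prefix]
    exact ⟨Z, by simp⟩
  rw [if_pos hp]
  congr 1
  congr 1
  simp

-- ---------- "src=" occurrence analysis ----------
theorem pvVar_decomp (q : Char) (p f : List Char) :
    pvVar q p f = ('s' :: 'r' :: 'c' :: '=' :: q :: p) ++ f ++ [q] := by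
  simp [pvVar]

theorem pvSafe2 (lit f : List Char) (q : Char)
    (hhead : ∀ k, 0 < k → k < lit.length → (lit.drop k).head? ≠ some 's')
    (hf : ¬ pvSRC <:+: f) (hq : q ∉ pvSRC) :
    ∀ k x, 0 < k → k < (lit ++ f ++ [q]).length → ¬ pvSRC <+: ((lit ++ f ++ [q]).drop k ++ x) := by
  intro k x hk hklen h
  rw [List.append_assoc] at h hklen
  by_cases hkl : k < lit.length
  · rw [List.drop_append_of_le_length (le_of_lt hkl)] at h
    have hdrop : lit.drop k = lit[k] :: lit.drop (k + 1) := List.drop_eq_getElem_cons hkl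
    rw [hdrop, List.cons_append, show pvSRC = 's' :: ['r', 'c', '='] from rfl] at h
    have hS : 's' = lit[k] := (List.cons_prefix_cons.mp h).1
    have h2 := hhead k hk hkl
    rw [hdrop] at h2
    simp only [List.head?_cons, ne_eq, Option.some.injEq] at h2
    exact h2 hS.symm
  · push_neg at hkl
    obtain ⟨j, rfl⟩ : ∃ j, k = lit.length + j := ⟨k - lit.length, by omega⟩
    have hj : j ≤ f.length := by simp at hklen; omega
    have hdr : (lit ++ (f ++ [q])).drop (lit.length + j) = (f ++ [q]).drop j := by
      rw [List.drop_append]; simp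
    rw [hdr] at h
    rw [List.drop_append_of_le_length hj] at h
    by_cases hj4 : j + 4 ≤ f.length
    · rw [List.append_assoc] at h
      have h1 : pvSRC <+: f.drop j :=
        pvPrefix_of_append _ _ _ h (by simp [pvSRC]; omega)
      exact hf (h1.isInfix.trans (f.drop_suffix j).isInfix)
    · -- the q sits at index d < 4 of the text
      set d : Nat := f.length - j with hd
      obtain ⟨t, ht⟩ := h
      have hd4 : d < 4 := by omega
      have hdl : (f.drop j).length = d := by simp [hd]
      have hgl : (f.drop j ++ [q] ++ x)[d]? = some q := by
        rw [List.getElem?_append_left (by simp [hdl]), List.getElem?_append_right (by omega)]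
        simp [hdl]
      rw [← ht] at hgl
      rw [List.getElem?_append_left (by simp [pvSRC]; omega)] at hgl
      exact hq (List.mem_of_getElem? hgl)

theorem pvSafe1 (lit f : List Char) (q : Char)
    (hhead : ∀ k, 0 < k → k < lit.length → (lit.drop k).head? ≠ some 's')
    (hf : ¬ pvSRC <:+: f) (hq : q ∉ pvSRC) :
    ∀ m x, 0 < m → m < (lit ++ f ++ [q]).length → ¬ ((lit ++ f ++ [q]).drop m <+: pvSRC ++ x) := by
  intro m x hm hmlen h
  rw [List.append_assoc] at h hmlen
  by_cases hml : m < lit.length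
  · rw [List.drop_append_of_le_length (le_of_lt hml)] at h
    have hdrop : lit.drop m = lit[m] :: lit.drop (m + 1) := List.drop_eq_getElem_cons hml
    rw [hdrop, List.cons_append, show pvSRC = 's' :: ['r', 'c', '='] from rfl] at h
    have hS : lit[m] = 's' := (List.cons_prefix_cons.mp h).1
    have h2 := hhead m hm hml
    rw [hdrop] at h2
    simp only [List.head?_cons, ne_eq, Option.some.injEq] at h2
    exact h2 hS
  · push_neg at hml
    obtain ⟨j, rfl⟩ : ∃ j, m = lit.length + j := ⟨m - lit.length, by omega⟩
    have hj : j ≤ f.length := by simp at hmlen; omega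
    have hdr : (lit ++ (f ++ [q])).drop (lit.length + j) = (f ++ [q]).drop j := by
      rw [List.drop_append]; simp
    rw [hdr] at h
    rw [List.drop_append_of_le_length hj] at h
    by_cases hj4 : j + 4 ≤ f.length
    · have h1 : pvSRC <+: f.drop j ++ [q] :=
        List.prefix_of_prefix_length_le (List.prefix_append _ _) h (by simp [pvSRC]; omega)
      have h2 : pvSRC <+: f.drop j :=
        pvPrefix_of_append _ _ _ (by simpa using h1) (by simp [pvSRC]; omega)
      exact hf (h2.isInfix.trans (f.drop_suffix j).isInfix)
    · set d : Nat := f.length - j with hd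
      obtain ⟨t, ht⟩ := h
      have hd4 : d < 4 := by omega
      have hdl : (f.drop j).length = d := by simp [hd]
      have hgl : ((f.drop j ++ [q]) ++ t)[d]? = some q := by
        rw [List.getElem?_append_left (by simp; omega), List.getElem?_append_right (by omega)]
        simp [hdl]
      rw [ht] at hgl
      rw [List.getElem?_append_left (by simp [pvSRC]; omega)] at hgl
      exact hq (List.mem_of_getElem? hgl)

-- instantiations for the eight variants and for the replacement pvR
theorem pvIsVar_safe1 (f w : List Char) (hf : ¬ pvSRC <:+: f) (h : pvIsVar f w) :
    ∀ m x, 0 < m → m < w.length → ¬ (w.drop m <+: pvSRC ++ x) := by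
  obtain ⟨q, p, hq, hp, rfl⟩ := h
  rw [pvVar_decomp]
  rcases hq with rfl | rfl <;> rcases hp with rfl | rfl | rfl | rfl <;>
    exact pvSafe1 _ f _
      (by intro k hk hkl; simp [pvO, pvDO, pvDDO] at hkl; interval_cases k <;> simp [pvO, pvDO, pvDDO])
      hf (by decide)

theorem pvIsVar_safe2 (f w : List Char) (hf : ¬ pvSRC <:+: f) (h : pvIsVar f w) :
    ∀ k x, 0 < k → k < w.length → ¬ pvSRC <+: (w.drop k ++ x) := by
  obtain ⟨q, p, hq, hp, rfl⟩ := h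
  rw [pvVar_decomp]
  rcases hq with rfl | rfl <;> rcases hp with rfl | rfl | rfl | rfl <;>
    exact pvSafe2 _ f _
      (by intro k hk hkl; simp [pvO, pvDO, pvDDO] at hkl; interval_cases k <;> simp [pvO, pvDO, pvDDO])
      hf (by decide)

theorem pvR_safe2 (f : List Char) (hf : ¬ pvSRC <:+: f) :
    ∀ k x, 0 < k → k < (pvR f).length → ¬ pvSRC <+: ((pvR f).drop k ++ x) := by
  rw [pvR, pvVar_decomp]
  exact pvSafe2 _ f _
    (by intro k hk hkl; simp at hkl; interval_cases k <;> simp)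
    hf (by decide)

-- ---------- variant shape facts ----------
theorem pvR_eq (f : List Char) :
    pvR f = pvSRC ++ ('"' :: (['/', 'o', 'u', 't', 'p', 'u', 't', '/'] ++ f ++ ['"'])) := by
  simp [pvR, pvVar, pvSRC]

theorem pvVar_drop4 (f w : List Char) (h : pvIsVar f w) : pvSRC ++ w.drop 4 = w := by
  obtain ⟨q, p, _, _, rfl⟩ := h
  simp [pvVar, pvSRC]

theorem pvVar_len (f w : List Char) (h : pvIsVar f w) : 4 < w.length := by
  obtain ⟨q, p, _, _, rfl⟩ := h
  simp [pvVar]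

theorem pvHeadClash (f w : List Char) (hw : pvIsVar f w) (c : Char) (x : List Char) (hc : c ≠ 's') :
    ¬ w <+: c :: x := by
  obtain ⟨q, p, _, _, rfl⟩ := hw
  intro h
  exact hc ((List.cons_prefix_cons.mp (by simpa [pvVar] using h)).1).symm

-- ---------- preservation: a replace pass cannot create a new variant match at the front ----------
theorem pvPreserve (f w : List Char) (hf : ¬ pvSRC <:+: f) (hw : pvIsVar f w) (v : List Char) :
    ∀ (b : List Char) (m : Nat), 0 < m → m < w.length → ¬ w.drop m <+: b →
      ¬ w.drop m <+: pvRepL v (pvR f) b := by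
  intro b
  induction hn : b.length using Nat.strong_induction_on generalizing b with
  | _ n ih =>
  subst hn
  intro m hm hmw hold h
  match b with
  | [] =>
    rw [pvRepL] at h
    have : w.drop m = [] := List.prefix_nil.mp h
    have := congrArg List.length this
    simp at this
    omega
  | c :: t =>
    rw [pvRepL] at h
    by_cases hp : v.isPrefixOf (c :: t)
    · rw [if_pos hp] at h
      rw [pvR_eq] at h
      rw [List.append_assoc] at h
      exact pvIsVar_safe1 f w hf hw m _ hm hmw h
    · rw [if_neg hp] at h
      have hdrop : w.drop m = w[m] :: w.drop (m + 1) := List.drop_eq_getElem_cons hmw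
      rw [hdrop] at h hold
      have hc : w[m] = c := (List.cons_prefix_cons.mp h).1
      have htail : w.drop (m + 1) <+: pvRepL v (pvR f) t := (List.cons_prefix_cons.mp h).2
      by_cases hm1 : m + 1 < w.length
      · have hold' : ¬ w.drop (m + 1) <+: t := by
          intro hx
          exact hold (by rw [hc]; exact List.cons_prefix_cons.mpr ⟨rfl, hx⟩)
        exact ih t.length (by simp) t rfl (m + 1) (by omega) hm1 hold' htail
      · have : w.drop (m + 1) = [] := List.drop_eq_nil_of_le (by omega)
        exact hold (by rw [this, hc]; exact List.cons_prefix_cons.mpr ⟨rfl, List.nil_prefix⟩)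

-- ---------- pairwise: distinct variants never match at the same position ----------
theorem pvEmptyNotPrefix (q : Char) (p' f x : List Char) (hp' : p' ≠ []) (hq : q ∉ p') :
    ¬ pvVar q [] f <+: pvVar q p' f ++ x := by
  intro h
  have h0 : (['s', 'r', 'c', '=', q] ++ (f ++ [q])) <+:
      ['s', 'r', 'c', '=', q] ++ ((p' ++ (f ++ [q])) ++ x) := by
    simpa [pvVar, List.append_assoc] using h
  have h1 := (List.prefix_append_right_inj _).mp h0
  have h2 : f ++ [q] <+: p' ++ (f ++ [q]) :=
    pvPrefix_of_append _ _ _ h1 (by simp)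
  exact hq (pvElem_of_prefix p' hp' _ h2 q (by simp))

theorem pvLongNotPrefix (q : Char) (p f x : List Char) (hp : p ≠ []) (hq : q ∉ p) :
    ¬ pvVar q p f <+: pvVar q [] f ++ x := by
  intro h
  have h0 : (['s', 'r', 'c', '=', q] ++ (p ++ (f ++ [q]))) <+:
      ['s', 'r', 'c', '=', q] ++ ((f ++ [q]) ++ x) := by
    simpa [pvVar, List.append_assoc] using h
  have h1 := (List.prefix_append_right_inj _).mp h0
  have h2 : f ++ [q] <+: p ++ (f ++ [q]) := pvShift p (f ++ [q]) x h1
  exact hq (pvElem_of_prefix p hp _ h2 q (by simp))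

theorem pvVar_ne_prefix (f w w' : List Char) (hw : pvIsVar f w) (hw' : pvIsVar f w')
    (hne : w ≠ w') (x : List Char) : ¬ w <+: w' ++ x := by
  obtain ⟨q, p, hq, hp, rfl⟩ := hw
  obtain ⟨q', p', hq', hp', rfl⟩ := hw'
  rcases hq with rfl | rfl <;> rcases hq' with rfl | rfl <;>
    rcases hp with rfl | rfl | rfl | rfl <;> rcases hp' with rfl | rfl | rfl | rfl <;>
    first
      | exact absurd rfl hne
      | exact pvEmptyNotPrefix _ _ _ _ (by simp [pvO, pvDO, pvDDO]) (by decide)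
      | exact pvLongNotPrefix _ _ _ _ (by simp [pvO, pvDO, pvDDO]) (by decide)
      | (intro h; simp [pvVar, pvO, pvDO, pvDDO, List.cons_prefix_cons] at h)

theorem pvR_not_prefix (f w : List Char) (hw : pvIsVar f w) (x : List Char) :
    ¬ w <+: pvR f ++ x := by
  have hR : pvR f = pvVar '"' ['/', 'o', 'u', 't', 'p', 'u', 't', '/'] f := rfl
  obtain ⟨q, p, hq, hp, rfl⟩ := hw
  rw [hR]
  rcases hq with rfl | rfl <;> rcases hp with rfl | rfl | rfl | rfl <;>
    first
      | exact pvEmptyNotPrefix _ _ _ _ (by simp) (by decide)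
      | (intro h; simp [pvVar, pvO, pvDO, pvDDO, List.cons_prefix_cons] at h)

theorem pvUniq (f w w' l : List Char) (hw : pvIsVar f w) (hw' : pvIsVar f w')
    (h : w <+: l) (h' : w' <+: l) : w = w' := by
  by_contra hne
  rcases le_total w.length w'.length with hle | hle
  · have h2 : w <+: w' ++ [] := by simpa using List.prefix_of_prefix_length_le h h' hle
    exact pvVar_ne_prefix f w w' hw hw' hne [] h2
  · have h2 : w' <+: w ++ [] := by simpa using List.prefix_of_prefix_length_le h' h hle
    exact pvVar_ne_prefix f w' w hw' hw (Ne.symm hne) [] h2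

-- ---------- first "src=" marker decomposition ----------
theorem pvDecomp (l : List Char) :
    (∀ k, ¬ pvSRC <+: l.drop k) ∨
      ∃ a b, l = a ++ pvSRC ++ b ∧ ∀ k < a.length, ¬ pvSRC <+: l.drop k := by
  induction l with
  | nil =>
    left
    intro k h
    rw [List.drop_nil] at h
    exact absurd (List.prefix_nil.mp h) (by simp [pvSRC])
  | cons c t ih =>
    by_cases h : pvSRC <+: c :: t
    · right
      obtain ⟨b, hb⟩ := h
      exact ⟨[], b, by simp [← hb], by simp⟩
    · rcases ih with ha | ⟨a, b, hab, hmin⟩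
      · left
        intro k
        cases k with
        | zero => simpa using h
        | succ k => simpa using ha k
      · right
        refine ⟨c :: a, b, by simp [hab], ?_⟩
        intro k hk
        cases k with
        | zero => simpa using h
        | succ k => simpa using hmin k (by simpa using hk)

-- ---------- first matching variant in a list ----------
theorem pvFirstSplit (P : List Char → Prop) [DecidablePred P] :
    ∀ (ws : List (List Char)),
      (∀ w ∈ ws, ¬ P w) ∨
        ∃ ws1 w ws2, ws = ws1 ++ w :: ws2 ∧ P w ∧ ∀ u ∈ ws1, ¬ P u := by
  intro ws
  induction ws with
  | nil => left; simp
  | cons v vs ih =>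
    by_cases hv : P v
    · right; exact ⟨[], v, vs, by simp, hv, by simp⟩
    · rcases ih with hnone | ⟨ws1, w, ws2, heq, hP, hws1⟩
      · left
        intro w hw
        rcases List.mem_cons.mp hw with rfl | hw'
        · exact hv
        · exact hnone w hw'
      · right
        refine ⟨v :: ws1, w, ws2, by simp [heq], hP, ?_⟩
        intro u hu
        rcases List.mem_cons.mp hu with rfl | hu'
        · exact hv
        · exact hws1 u hu'

theorem pvFind_none (vars : List (List Char)) (l : List Char)
    (h : ∀ w ∈ vars, ¬ w <+: l) :
    vars.find? (fun v => v.isPrefixOf l) = none := by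
  rw [List.find?_eq_none]
  intro w hw
  simpa [List.isPrefixOf_iff_prefix] using h w hw

theorem pvFind_some (vars : List (List Char)) (l w : List Char)
    (hmem : w ∈ vars) (hp : w <+: l) (huniq : ∀ w' ∈ vars, w' <+: l → w' = w) :
    vars.find? (fun v => v.isPrefixOf l) = some w := by
  induction vars with
  | nil => simp at hmem
  | cons v vs ih =>
    by_cases hv : v <+: l
    · have : v = w := huniq v (by simp) hv
      subst this
      simp [List.isPrefixOf_iff_prefix, hv]
    · rw [List.find?_cons]
      have hvb : (v.isPrefixOf l) = false := by
        rw [← Bool.not_eq_true, List.isPrefixOf_iff_prefix]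
        exact hv
      rw [hvb]
      have hmem' : w ∈ vs := by
        rcases List.mem_cons.mp hmem with rfl | h'
        · exact absurd hp hv
        · exact h'
      exact ih hmem' (fun w' hw' hp' => huniq w' (by simp [hw']) hp')

-- ---------- transfer of marker minimality to modified tails ----------
theorem pvMinTrans (a b Y : List Char)
    (hmin : ∀ k < a.length, ¬ pvSRC <+: (a ++ pvSRC ++ b).drop k) :
    ∀ k < a.length, ¬ pvSRC <+: a.drop k ++ (pvSRC ++ Y) := by
  intro k hk h
  have h1 : pvSRC <+: a.drop k ++ pvSRC :=
    pvPrefix_of_append _ _ _ (by simpa [List.append_assoc] using h) (by simp)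
  apply hmin k hk
  have hdr : (a ++ pvSRC ++ b).drop k = a.drop k ++ (pvSRC ++ b) := by
    rw [List.append_assoc, List.drop_append_of_le_length (le_of_lt hk)]
  rw [hdr]
  exact h1.trans (by rw [← List.append_assoc]; exact List.prefix_append _ _)

-- ---------- identity on marker-free text ----------
theorem pvRepL_id (v new : List Char) (hv : pvSRC <+: v) :
    ∀ l : List Char, (∀ k, ¬ pvSRC <+: l.drop k) → pvRepL v new l = l := by
  intro l
  induction l with
  | nil => intro _; rw [pvRepL]
  | cons c t ih =>
    intro h
    rw [pvRepL]
    have : ¬ v.isPrefixOf (c :: t) := by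
      rw [List.isPrefixOf_iff_prefix]
      intro hp
      exact h 0 (by simpa using hv.trans hp)
    rw [if_neg this, ih (fun k => by simpa using h (k + 1))]

theorem pvScan_id (vars : List (List Char)) (cor : List Char)
    (hv : ∀ w ∈ vars, pvSRC <+: w) :
    ∀ l : List Char, (∀ k, ¬ pvSRC <+: l.drop k) → pvScan vars cor l = l := by
  intro l
  induction l with
  | nil => intro _; rw [pvScan]
  | cons c t ih =>
    intro h
    rw [pvScan]
    rw [pvFind_none vars (c :: t) (fun w hw hp => h 0 (by simpa using (hv w hw).trans hp))]
    simp only []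
    rw [ih (fun k => by simpa using h (k + 1))]

theorem pvChain_id (f : List Char) :
    ∀ (ws : List (List Char)) (l : List Char), (∀ w ∈ ws, pvIsVar f w) →
      (∀ k, ¬ pvSRC <+: l.drop k) → pvChain f ws l = l := by
  intro ws
  induction ws with
  | nil => intro l _ _; rfl
  | cons w ws ih =>
    intro l hvar h
    have hw := hvar w (by simp)
    have hsrc : pvSRC <+: w := ⟨w.drop 4, pvVar_drop4 f w hw⟩
    have hstep : pvRepL w (pvR f) l = l := pvRepL_id w (pvR f) hsrc l h
    simp only [pvChain, List.foldl_cons]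
    rw [hstep]
    exact ih l (fun w' hw' => hvar w' (by simp [hw'])) h

-- ---------- a variant matches at a marker iff its tail matches after it ----------
theorem pvDrop4_iff (f w Y : List Char) (hw : pvIsVar f w) :
    w <+: pvSRC ++ Y ↔ w.drop 4 <+: Y := by
  constructor
  · intro h
    rw [← pvVar_drop4 f w hw] at h
    exact (List.prefix_append_right_inj pvSRC).mp h
  · intro h
    rw [← pvVar_drop4 f w hw]
    exact (List.prefix_append_right_inj pvSRC).mpr h

-- ---------- single replace pass across "a ++ src= ++ Y" for a non-matching variant ----------
theorem pvStep_skip (f a b Y w : List Char) (hf : ¬ pvSRC <:+: f) (hw : pvIsVar f w)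
    (hmin : ∀ k < a.length, ¬ pvSRC <+: (a ++ pvSRC ++ b).drop k)
    (hY : ¬ w.drop 4 <+: Y) :
    pvRepL w (pvR f) (a ++ (pvSRC ++ Y)) = a ++ (pvSRC ++ pvRepL w (pvR f) Y) := by
  have hsrc : pvSRC <+: w := ⟨w.drop 4, pvVar_drop4 f w hw⟩
  rw [pvRepL_skip w (pvR f) a (pvSRC ++ Y)
    (fun k hk hpre => pvMinTrans a b Y hmin k hk (hsrc.trans hpre))]
  congr 1
  rw [pvRepL_skip w (pvR f) pvSRC Y ?_]
  intro k hk
  match k, hk with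
  | 0, _ =>
    intro hpre
    exact hY ((pvDrop4_iff f w Y hw).mp (by simpa using hpre))
  | 1, _ => exact pvHeadClash f w hw _ _ (by decide)
  | 2, _ => exact pvHeadClash f w hw _ _ (by decide)
  | 3, _ => exact pvHeadClash f w hw _ _ (by decide)

-- ---------- chain across "a ++ src= ++ Y" when no remaining variant matches at the marker ----------
theorem pvChain_skipβ (f a b : List Char) (hf : ¬ pvSRC <:+: f)
    (hmin : ∀ k < a.length, ¬ pvSRC <+: (a ++ pvSRC ++ b).drop k) :
    ∀ (ws : List (List Char)) (Y : List Char), (∀ w ∈ ws, pvIsVar f w) →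
      (∀ w ∈ ws, ¬ w.drop 4 <+: Y) →
      pvChain f ws (a ++ (pvSRC ++ Y)) = a ++ (pvSRC ++ pvChain f ws Y) := by
  intro ws
  induction ws with
  | nil => intro Y _ _; rfl
  | cons w ws ih =>
    intro Y hvar hY
    have hw := hvar w (by simp)
    simp only [pvChain, List.foldl_cons]
    rw [pvStep_skip f a b Y w hf hw hmin (hY w (by simp))]
    have hvar' : ∀ w' ∈ ws, pvIsVar f w' := fun w' hw' => hvar w' (by simp [hw'])
    have hY' : ∀ w' ∈ ws, ¬ w'.drop 4 <+: pvRepL w (pvR f) Y := fun w' hw' =>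
      pvPreserve f w' hf (hvar' w' hw') w Y 4 (by omega)
        (pvVar_len f w' (hvar' w' hw')) (hY w' (by simp [hw']))
    exact ih (pvRepL w (pvR f) Y) hvar' hY'

-- ---------- chain skipping the tail of the matched variant ----------
theorem pvChain_skipTail (f wstar : List Char) (hf : ¬ pvSRC <:+: f) (hstar : pvIsVar f wstar) :
    ∀ (ws : List (List Char)) (Z : List Char), (∀ w ∈ ws, pvIsVar f w) →
      pvChain f ws (wstar.drop 4 ++ Z) = wstar.drop 4 ++ pvChain f ws Z := by
  intro ws
  induction ws with
  | nil => intro Z _; rfl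
  | cons w ws ih =>
    intro Z hvar
    have hw := hvar w (by simp)
    have hsrc : pvSRC <+: w := ⟨w.drop 4, pvVar_drop4 f w hw⟩
    simp only [pvChain, List.foldl_cons]
    rw [pvRepL_skip w (pvR f) (wstar.drop 4) Z ?_]
    · exact ih (pvRepL w (pvR f) Z) (fun w' hw' => hvar w' (by simp [hw']))
    · intro k hk hpre
      rw [List.drop_drop] at hpre
      exact pvIsVar_safe2 f wstar hf hstar (k + 4) Z (by omega)
        (by simp at hk; omega) (hsrc.trans (by rwa [Nat.add_comm] at hpre))

-- ---------- chain skipping an inserted replacement block ----------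
theorem pvChain_skipR (f a b : List Char) (hf : ¬ pvSRC <:+: f)
    (hmin : ∀ k < a.length, ¬ pvSRC <+: (a ++ pvSRC ++ b).drop k) :
    ∀ (ws : List (List Char)) (Z : List Char), (∀ w ∈ ws, pvIsVar f w) →
      pvChain f ws (a ++ (pvR f ++ Z)) = a ++ (pvR f ++ pvChain f ws Z) := by
  intro ws
  induction ws with
  | nil => intro Z _; rfl
  | cons w ws ih =>
    intro Z hvar
    have hw := hvar w (by simp)
    have hsrc : pvSRC <+: w := ⟨w.drop 4, pvVar_drop4 f w hw⟩
    simp only [pvChain, List.foldl_cons]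
    have hstep : pvRepL w (pvR f) (a ++ (pvR f ++ Z)) = a ++ (pvR f ++ pvRepL w (pvR f) Z) := by
      rw [pvRepL_skip w (pvR f) a (pvR f ++ Z) ?_]
      · congr 1
        rw [pvRepL_skip w (pvR f) (pvR f) Z ?_]
        intro k hk
        match k, hk with
        | 0, _ => intro hpre; exact pvR_not_prefix f w hw Z (by simpa using hpre)
        | (k + 1), hk =>
          intro hpre
          exact pvR_safe2 f hf (k + 1) Z (by omega) hk (hsrc.trans hpre)
      · intro k hk hpre
        apply pvMinTrans a b (('"' :: (['/', 'o', 'u', 't', 'p', 'u', 't', '/'] ++ f ++ ['"'])) ++ Z) hmin k hk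
        have h2 := hsrc.trans hpre
        rwa [pvR_eq, List.append_assoc] at h2
    rw [hstep]
    exact ih (pvRepL w (pvR f) Z) (fun w' hw' => hvar w' (by simp [hw']))

-- ---------- the matching replace pass ----------
theorem pvStep_match (f a b wstar Z : List Char) (hstar : pvIsVar f wstar)
    (hmin : ∀ k < a.length, ¬ pvSRC <+: (a ++ pvSRC ++ b).drop k) :
    pvRepL wstar (pvR f) (a ++ (wstar ++ Z)) = a ++ (pvR f ++ pvRepL wstar (pvR f) Z) := by
  have hsrc : pvSRC <+: wstar := ⟨wstar.drop 4, pvVar_drop4 f wstar hstar⟩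
  rw [pvRepL_skip wstar (pvR f) a (wstar ++ Z) ?_]
  · congr 1
    obtain ⟨q, p, _, _, rfl⟩ := hstar
    exact pvRepL_match _ _ Z 's' _ rfl
  · intro k hk hpre
    apply pvMinTrans a b (wstar.drop 4 ++ Z) hmin k hk
    have h2 := hsrc.trans hpre
    rwa [← pvVar_drop4 f wstar hstar, List.append_assoc] at h2

-- ---------- scan-side block lemmas ----------
theorem pvScan_skipA (f a b x cor : List Char) (vars : List (List Char))
    (hvar : ∀ w ∈ vars, pvIsVar f w)
    (hmin : ∀ k < a.length, ¬ pvSRC <+: (a ++ pvSRC ++ b).drop k)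
    (hx : x = pvSRC ++ b) :
    pvScan vars cor (a ++ x) = a ++ pvScan vars cor x := by
  subst hx
  rw [pvScan_skip vars cor a (pvSRC ++ b) ?_]
  intro k hk w hw hpre
  have hsrc : pvSRC <+: w := ⟨w.drop 4, pvVar_drop4 f w (hvar w hw)⟩
  exact pvMinTrans a b b hmin k hk (hsrc.trans hpre)

theorem pvHeadClash' (w : List Char) (hsrc : pvSRC <+: w) (c : Char) (x : List Char)
    (hc : c ≠ 's') : ¬ w <+: c :: x := by
  intro h
  exact hc ((List.cons_prefix_cons.mp (show pvSRC <+: c :: x from hsrc.trans h)).1).symm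

theorem pvScan_marker_none (b cor : List Char) (vars : List (List Char))
    (hsrc : ∀ w ∈ vars, pvSRC <+: w)
    (hnone : ∀ w ∈ vars, ¬ w <+: pvSRC ++ b) :
    pvScan vars cor (pvSRC ++ b) = pvSRC ++ pvScan vars cor b := by
  rw [pvScan_skip vars cor pvSRC b ?_]
  intro k hk w hw
  match k, hk with
  | 0, _ => intro hpre; exact hnone w hw (by simpa using hpre)
  | 1, _ => exact pvHeadClash' w (hsrc w hw) _ _ (by decide)
  | 2, _ => exact pvHeadClash' w (hsrc w hw) _ _ (by decide)
  | 3, _ => exact pvHeadClash' w (hsrc w hw) _ _ (by decide)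

theorem pvScan_marker_match (f u cor wstar : List Char) (vars : List (List Char))
    (hvar : ∀ w ∈ vars, pvIsVar f w) (hstar : pvIsVar f wstar) (hmem : wstar ∈ vars) :
    pvScan vars cor (wstar ++ u) = cor ++ pvScan vars cor u := by
  obtain ⟨q, p, hq, hp, rfl⟩ := hstar
  have hcons : pvVar q p f ++ u = 's' :: ((('r' :: 'c' :: '=' :: q :: (p ++ f ++ [q]))) ++ u) := by
    simp [pvVar]
  rw [hcons, pvScan]
  have hfind : vars.find? (fun v => v.isPrefixOf
      ('s' :: ((('r' :: 'c' :: '=' :: q :: (p ++ f ++ [q]))) ++ u))) = some (pvVar q p f) := by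
    apply pvFind_some vars _ _ hmem
    · rw [← hcons]; exact List.prefix_append _ _
    · intro w' hw' hp'
      rw [← hcons] at hp'
      exact pvUniq f w' (pvVar q p f) _ (hvar w' hw') ⟨q, p, hq, hp, rfl⟩ hp'
        (List.prefix_append _ _)
  rw [hfind]
  simp only []
  congr 1
  have hlen : (pvVar q p f).length - 1 = ('r' :: 'c' :: '=' :: q :: (p ++ f ++ [q])).length := by
    simp [pvVar]
  rw [hlen, List.drop_append_of_le_length le_rfl]
  simp

-- ---------- membership and variant-ness of the two concrete variant lists ----------
theorem pvVarsA_isVar (f : List Char) : ∀ w ∈ pvVarsA f, pvIsVar f w := by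
  intro w hw
  simp only [pvVarsA, List.mem_cons, List.not_mem_nil, or_false] at hw
  rcases hw with rfl | rfl | rfl | rfl | rfl | rfl | rfl | rfl <;>
    exact ⟨_, _, by simp, by simp, rfl⟩

theorem pvVarsB_isVar (f : List Char) : ∀ w ∈ pvVarsB f, pvIsVar f w := by
  intro w hw
  simp only [pvVarsB, List.mem_cons, List.not_mem_nil, or_false] at hw
  rcases hw with rfl | rfl | rfl | rfl | rfl | rfl | rfl | rfl <;>
    exact ⟨_, _, by simp, by simp, rfl⟩

theorem pvMemAB (f w : List Char) : w ∈ pvVarsA f ↔ w ∈ pvVarsB f := by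
  simp only [pvVarsA, pvVarsB, List.mem_cons, List.not_mem_nil, or_false]
  tauto

theorem pvChain_append (f : List Char) (ws1 ws2 : List (List Char)) (l : List Char) :
    pvChain f (ws1 ++ ws2) l = pvChain f ws2 (pvChain f ws1 l) := by
  simp [pvChain, List.foldl_append]

theorem pvChain_cons (f : List Char) (w : List Char) (ws : List (List Char)) (l : List Char) :
    pvChain f (w :: ws) l = pvChain f ws (pvRepL w (pvR f) l) := by
  simp [pvChain, List.foldl_cons]

-- ---------- MAIN: the eight sequential replace passes equal the single scan ----------
theorem pvMain (f : List Char) (hf : ¬ pvSRC <:+: f) :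
    ∀ l : List Char, pvChain f (pvVarsA f) l = pvScan (pvVarsB f) (pvR f) l := by
  intro l
  induction hn : l.length using Nat.strong_induction_on generalizing l with
  | _ n ih =>
  subst hn
  rcases pvDecomp l with hno | ⟨a, b, rfl, hmin⟩
  · rw [pvChain_id f (pvVarsA f) l (pvVarsA_isVar f) hno,
      pvScan_id (pvVarsB f) (pvR f)
        (fun w hw => ⟨w.drop 4, pvVar_drop4 f w (pvVarsB_isVar f w hw)⟩) l hno]
  · have hassoc : a ++ pvSRC ++ b = a ++ (pvSRC ++ b) := by rw [List.append_assoc]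
    have hblen : b.length < (a ++ pvSRC ++ b).length := by simp [pvSRC]; omega
    rcases pvFirstSplit (fun w => w <+: pvSRC ++ b) (pvVarsA f) with hnone | ⟨ws1, w0, ws2, hsplit, hPw0, hws1⟩
    · -- no variant matches at the first marker
      have hnoneB : ∀ w ∈ pvVarsB f, ¬ w <+: pvSRC ++ b :=
        fun w hw => hnone w ((pvMemAB f w).mpr hw)
      rw [hassoc]
      rw [pvChain_skipβ f a b hf hmin (pvVarsA f) b (pvVarsA_isVar f)
        (fun w hw hp => hnone w hw ((pvDrop4_iff f w b (pvVarsA_isVar f w hw)).mpr hp))]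
      rw [pvScan_skipA f a b (pvSRC ++ b) (pvR f) (pvVarsB f) (pvVarsB_isVar f) hmin rfl]
      rw [pvScan_marker_none b (pvR f) (pvVarsB f)
        (fun w hw => ⟨w.drop 4, pvVar_drop4 f w (pvVarsB_isVar f w hw)⟩) hnoneB]
      rw [ih b.length hblen b rfl]
    · -- w0 is the first (and only) variant matching at the marker
      have hw0 : pvIsVar f w0 := pvVarsA_isVar f w0 (by rw [hsplit]; simp)
      obtain ⟨u, hu⟩ := hPw0
      have hb : w0.drop 4 ++ u = b := by
        rw [← pvVar_drop4 f w0 hw0, List.append_assoc] at hu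
        exact List.append_cancel_left hu
      have hulen : u.length < (a ++ pvSRC ++ b).length := by
        have h1 := congrArg List.length hb
        have h2 : 4 < w0.length := pvVar_len f w0 hw0
        simp at h1
        simp [pvSRC]
        omega
      have hvar1 : ∀ w ∈ ws1, pvIsVar f w := by
        intro w hw
        exact pvVarsA_isVar f w (by rw [hsplit]; simp [hw])
      have hvar2 : ∀ w ∈ ws2, pvIsVar f w := by
        intro w hw
        exact pvVarsA_isVar f w (by rw [hsplit]; simp [hw])
      -- chain side
      rw [hassoc, hsplit, pvChain_append, pvChain_cons]
      rw [show pvSRC ++ b = pvSRC ++ (w0.drop 4 ++ u) by rw [hb]]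
      rw [pvChain_skipβ f a b hf hmin ws1 (w0.drop 4 ++ u) hvar1
        (fun w hw hp => hws1 w hw (by rw [← hb]; exact (pvDrop4_iff f w _ (hvar1 w hw)).mpr hp))]
      rw [pvChain_skipTail f w0 hf hw0 ws1 u hvar1]
      have h3 : pvSRC ++ (w0.drop 4 ++ pvChain f ws1 u) = w0 ++ pvChain f ws1 u := by
        rw [← List.append_assoc, pvVar_drop4 f w0 hw0]
      rw [h3]
      rw [pvStep_match f a b w0 (pvChain f ws1 u) hw0 hmin]
      rw [pvChain_skipR f a b hf hmin ws2 _ hvar2]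
      have hchain : pvChain f ws2 (pvRepL w0 (pvR f) (pvChain f ws1 u)) = pvChain f (pvVarsA f) u := by
        rw [hsplit, pvChain_append, pvChain_cons]
      rw [hchain, ih u.length hulen u rfl]
      -- scan side
      rw [pvScan_skipA f a b (pvSRC ++ (w0.drop 4 ++ u)) (pvR f) (pvVarsB f) (pvVarsB_isVar f)
        hmin (by rw [hb])]
      have h4 : pvSRC ++ (w0.drop 4 ++ u) = w0 ++ u := by
        rw [← List.append_assoc, pvVar_drop4 f w0 hw0]
      rw [h4]
      rw [pvScan_marker_match f u (pvR f) w0 (pvVarsB f) (pvVarsB_isVar f) hw0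
        ((pvMemAB f w0).mp (by rw [hsplit]; simp))]

-- ---------- bridge: the String-level ports compute the Chars-level functions ----------
theorem pvFold_toList (c : String) (ws : List String) :
    ∀ h : String, (∀ w ∈ ws, w.toList ≠ []) →
      (ws.foldl (fun h w => PySem.Str.replace h w c) h).toList
        = ws.foldl (fun l w => pvRepL w.toList c.toList l) h.toList := by
  induction ws with
  | nil => intro h _; rfl
  | cons w ws ih =>
    intro h hne
    rw [List.foldl_cons, List.foldl_cons]
    rw [ih _ (fun w' hw' => hne w' (by simp [hw']))]
    rw [PySem.Str.toList_replace, pvReplace_eq _ _ _ (hne w (by simp))]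

theorem pvVarsA_str (s : String) :
    [("src=\"" ++ s ++ "\"" : String),
     "src='" ++ s ++ "'",
     "src=\"output/" ++ s ++ "\"",
     "src='output/" ++ s ++ "'",
     "src=\"./output/" ++ s ++ "\"",
     "src='./output/" ++ s ++ "'",
     "src=\"../output/" ++ s ++ "\"",
     "src='../output/" ++ s ++ "'"].map String.toList = pvVarsA s.toList := by
  simp [pvVarsA, pvVar, pvO, pvDO, pvDDO, String.toList_append]

theorem pvVarsB_str (s : String) :
    ((["\"", "'"] : List String).flatMap (fun q =>
        (["", "output/", "./output/", "../output/"] : List String).map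
          (fun p => "src=" ++ q ++ p ++ s ++ q))).map String.toList = pvVarsB s.toList := by
  simp [pvVarsB, pvVar, pvO, pvDO, pvDDO, String.toList_append]

theorem pvCor_str (s : String) : ("src=\"/output/" ++ s ++ "\"").toList = pvR s.toList := by
  simp [pvR, pvVar, String.toList_append]

-- named step functions (definitionally the two ports' fold bodies)
def pvStepA (html filename : String) : String :=
  let wrong_variants : List String := [
    "src=\"" ++ filename ++ "\"",
    "src='" ++ filename ++ "'",
    "src=\"output/" ++ filename ++ "\"",
    "src='output/" ++ filename ++ "'",
    "src=\"./output/" ++ filename ++ "\"",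
    "src='./output/" ++ filename ++ "'",
    "src=\"../output/" ++ filename ++ "\"",
    "src='../output/" ++ filename ++ "'"]
  let correct := "src=\"/output/" ++ filename ++ "\""
  wrong_variants.foldl (fun html wrong => PySem.Str.replace html wrong correct) html

def pvStepB (html filename : String) : String :=
  let correct := "src=\"/output/" ++ filename ++ "\""
  let variants : List String :=
    ["\"", "'"].flatMap (fun q =>
      ["", "output/", "./output/", "../output/"].map (fun p => "src=" ++ q ++ p ++ filename ++ q))
  String.ofList (pvScanM (variants.map String.toList) correct.toList html.toList)

theorem pvFixA_eq (html : String) (fns : List String) :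
    fix_image_paths html fns = fns.foldl pvStepA html := rfl

theorem pvFixB_eq (html : String) (fns : List String) :
    fix_image_paths_alt html fns = fns.foldl pvStepB html := rfl

theorem pvStepA_toList (s html : String) :
    (pvStepA html s).toList = pvChain s.toList (pvVarsA s.toList) html.toList := by
  have hne : ∀ w ∈ [("src=\"" ++ s ++ "\"" : String),
      "src='" ++ s ++ "'",
      "src=\"output/" ++ s ++ "\"",
      "src='output/" ++ s ++ "'",
      "src=\"./output/" ++ s ++ "\"",
      "src='./output/" ++ s ++ "'",
      "src=\"../output/" ++ s ++ "\"",
      "src='../output/" ++ s ++ "'"], w.toList ≠ [] := by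
    intro w hw
    have hmem : w.toList ∈ pvVarsA s.toList := by
      rw [← pvVarsA_str s]
      exact List.mem_map_of_mem hw
    obtain ⟨q, p, _, _, hv⟩ := pvVarsA_isVar s.toList w.toList hmem
    simp [hv, pvVar]
  show (List.foldl _ html _).toList = _
  rw [pvFold_toList _ _ _ hne]
  rw [pvCor_str s]
  rw [← List.foldl_map (f := String.toList) (g := fun l v => pvRepL v (pvR s.toList) l)]
  rw [pvVarsA_str s]
  rfl

-- ---------- the marker-jumping scan of Source B equals the position scan ----------
theorem pvTakeDrop (l : List Char) (k j : Nat) (h : k ≤ (l.take j).length) :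
    (l.take j).drop k ++ l.drop j = l.drop k := by
  rw [← List.drop_append_of_le_length h, List.take_append_drop]

theorem pvScanM_eq (vars : List (List Char)) (cor : List Char)
    (hsrc : ∀ w ∈ vars, pvSRC <+: w) :
    ∀ l : List Char, pvScanM vars cor l = pvScan vars cor l := by
  intro l
  induction hn : l.length using Nat.strong_induction_on generalizing l with
  | _ n ih =>
  subst hn
  rw [pvScanM]
  by_cases hj : PySem.Chars.find l ['s', 'r', 'c', '='] = -1
  · rw [dif_pos hj]
    have hni : ¬ (['s', 'r', 'c', '='] <:+: l) := (PySem.Chars.find_eq_neg_one_iff l _).mp hj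
    rw [pvScan_id vars cor hsrc l ?_]
    intro k hp
    exact hni ((show pvSRC = ['s', 'r', 'c', '='] from rfl) ▸
      (hp.isInfix.trans (l.drop_suffix k).isInfix))
  · rw [dif_neg hj]
    have h0 : 0 ≤ PySem.Chars.find l ['s', 'r', 'c', '='] := by
      have := PySem.Chars.neg_one_le_find l ['s', 'r', 'c', '=']
      omega
    obtain ⟨hpre, hmin⟩ := PySem.Chars.find_spec (s := l) (sub := ['s', 'r', 'c', '=']) h0
    set jn : Nat := (PySem.Chars.find l ['s', 'r', 'c', '=']).toNat with hjn
    have hpre' : pvSRC <+: l.drop jn := hpre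
    have hjl : jn < l.length := by
      by_contra hge
      rw [List.drop_eq_nil_of_le (by omega)] at hpre'
      simpa [pvSRC] using List.prefix_nil.mp hpre'
    have htlen : (l.take jn).length = jn := by simp; omega
    have hskip : pvScan vars cor l = l.take jn ++ pvScan vars cor (l.drop jn) := by
      conv_lhs => rw [← List.take_append_drop jn l]
      rw [pvScan_skip vars cor (l.take jn) (l.drop jn) ?_]
      intro k hk w hw hp
      have hklt : k < jn := by omega
      rw [pvTakeDrop l k jn (by omega)] at hp
      exact hmin k hklt ((hsrc w hw).trans hp)
    obtain ⟨b, hb⟩ := hpre'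
    cases hfind : vars.find? (fun v => v.isPrefixOf (l.drop jn)) with
    | none =>
      simp only []
      have hnone : ∀ w ∈ vars, ¬ w <+: l.drop jn := by
        intro w hw
        have := List.find?_eq_none.mp hfind w hw
        simpa [List.isPrefixOf_iff_prefix] using this
      have hb4 : l.drop (jn + 4) = b := by
        have h1 := congrArg (List.drop 4) hb
        rw [List.drop_drop] at h1
        have h2 : b = l.drop (jn + 4) := by simpa [pvSRC] using h1
        rw [h2]
      have hblen : b.length < l.length := by
        have := congrArg List.length hb
        simp [pvSRC] at this
        omega
      rw [hfind]
      simp only []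
      rw [hskip, ← hb, pvScan_marker_none b cor vars hsrc (by rw [hb]; exact hnone)]
      rw [hb4, ih b.length hblen b rfl]
      rfl
    | some v =>
      simp only []
      have hvmem : v ∈ vars := List.mem_of_find?_eq_some hfind
      have hvpre : v <+: l.drop jn := by
        have := List.find?_some hfind
        simpa [List.isPrefixOf_iff_prefix] using this
      have hvsrc : pvSRC <+: v := hsrc v hvmem
      have hv4 : 4 ≤ v.length := by simpa [pvSRC] using hvsrc.length_le
      obtain ⟨u, hu⟩ := hvpre
      have hvshape : v = 's' :: 'r' :: 'c' :: '=' :: v.drop 4 := by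
        obtain ⟨v4, hv⟩ := hvsrc
        rw [← hv]
        simp [pvSRC]
      have hrest : l.drop jn = 's' :: ('r' :: 'c' :: '=' :: (v.drop 4 ++ u)) := by
        rw [← hu]
        conv_lhs => rw [hvshape]
        simp
      have hulen : u.length < l.length := by
        have := congrArg List.length hu
        simp at this
        omega
      have hdropv : l.drop (jn + 1 + (v.length - 1)) = u := by
        have h1 : jn + 1 + (v.length - 1) = jn + v.length := by omega
        rw [h1, ← List.drop_drop, ← hu]
        rw [List.drop_left]
      rw [hskip, hrest, pvScan]
      rw [show ('s' :: ('r' :: 'c' :: '=' :: (v.drop 4 ++ u))) = l.drop jn from hrest.symm, hfind]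
      simp only []
      rw [hdropv, ih u.length hulen u rfl]
      congr 2
      have ht : ('r' :: 'c' :: '=' :: (v.drop 4 ++ u)) = v.drop 1 ++ u := by
        conv_rhs => rw [hvshape]
        simp
      rw [ht, show v.length - 1 = (v.drop 1).length by simp, List.drop_left]

theorem pvStepB_toList (s html : String) :
    (pvStepB html s).toList = pvScan (pvVarsB s.toList) (pvR s.toList) html.toList := by
  show (String.ofList _).toList = _
  rw [String.toList_ofList, pvVarsB_str s, pvCor_str s]
  exact pvScanM_eq (pvVarsB s.toList) (pvR s.toList)
    (fun w hw => ⟨w.drop 4, pvVar_drop4 s.toList w (pvVarsB_isVar s.toList w hw)⟩) html.toList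

theorem pvStep_eq (s : String) (hs : ¬ pvSRC <:+: s.toList) (html : String) :
    pvStepA html s = pvStepB html s := by
  apply String.toList_inj.mp
  rw [pvStepA_toList, pvStepB_toList]
  exact pvMain s.toList hs html.toList

theorem pvStepA_id (s html : String) (h : ∀ k, ¬ pvSRC <+: html.toList.drop k) :
    pvStepA html s = html := by
  apply String.toList_inj.mp
  rw [pvStepA_toList]
  exact pvChain_id s.toList (pvVarsA s.toList) html.toList (pvVarsA_isVar s.toList) h

theorem pvStepB_id (s html : String) (h : ∀ k, ¬ pvSRC <+: html.toList.drop k) :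
    pvStepB html s = html := by
  apply String.toList_inj.mp
  rw [pvStepB_toList]
  exact pvScan_id (pvVarsB s.toList) (pvR s.toList)
    (fun w hw => ⟨w.drop 4, pvVar_drop4 s.toList w (pvVarsB_isVar s.toList w hw)⟩)
    html.toList h

theorem pvPorts_eq : ∀ (fns : List String) (html : String),
    (∀ f ∈ fns, ¬ pvSRC <:+: f.toList) →
    fix_image_paths html fns = fix_image_paths_alt html fns := by
  intro fns
  induction fns with
  | nil => intro html _; rfl
  | cons s rest ih =>
    intro html hpre
    rw [pvFixA_eq, pvFixB_eq, List.foldl_cons, List.foldl_cons]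
    rw [pvStep_eq s (hpre s (by simp)) html]
    have := ih (pvStepB html s) (fun f hf => hpre f (by simp [hf]))
    rwa [pvFixA_eq, pvFixB_eq] at this

theorem pvPorts_id : ∀ (fns : List String) (html : String),
    (∀ k, ¬ pvSRC <+: html.toList.drop k) →
    fix_image_paths html fns = fix_image_paths_alt html fns := by
  intro fns
  induction fns with
  | nil => intro html _; rfl
  | cons s rest ih =>
    intro html h
    rw [pvFixA_eq, pvFixB_eq, List.foldl_cons, List.foldl_cons]
    rw [pvStepA_id s html h, pvStepB_id s html h]
    have := ih html h
    rwa [pvFixA_eq, pvFixB_eq] at this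

-- ===== VERDICT (by name: the statement is the Claim_ definition above) =====
theorem fix_image_paths_spec : Claim_equal_fix_image_paths := by
  intro html fns _ hpre
  unfold Spec_fix_image_paths
  rcases hpre with hpre | hpre
  · apply pvPorts_eq
    intro f hf hsub
    apply hpre f hf
    rw [PySem.Str.isIn_iff_infix]
    exact hsub
  · apply pvPorts_id
    intro k hk
    apply hpre
    rw [PySem.Str.isIn_iff_infix]
    exact hk.isInfix.trans (html.toList.drop_suffix k).isInfix
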